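-- pv_equiv track=rewrite | github.com/taylor-hickman/provider_dedupe | tests/fixtures/sample_data.py | _generate_valid_group_npi_for_dataset
-- ===== SOURCE A (Python) =====
-- def _generate_valid_group_npi_for_dataset(index: int) -> str:
--     """Generate a valid group NPI for large dataset based on index."""
--     # Use different base patterns for group NPIs
--     base_patterns = [
--         "098765432", "098765433", "098765434", "098765435", "098765436",
--         "098765437", "098765438", "098765439", "098765440", "098765441"
--     ]
--     base = base_patterns[index % len(base_patterns)]
--
--     # Luhn algorithm for NPI validation
--     payload = [int(d) for d in base]
--     for i in range(len(payload) - 1, -1, -2):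
--         payload[i] *= 2
--         if payload[i] > 9:
--             payload[i] -= 9
--
--     total = sum(payload) + 24  # 24 is the sum for the prefix 80840
--     check_digit = (10 - (total % 10)) % 10
--
--     return base + str(check_digit)
-- ===== SOURCE B (Python) =====
-- def _npi_luhn_valid(npi: str) -> bool:
--     """Check a full 10-digit NPI against the Luhn rule (with the 80840 prefix)."""
--     total = 24  # checksum contribution of the fixed 80840 prefix
--     for i, ch in enumerate(npi):
--         d = int(ch)
--         # double every second digit counting from the right, skipping the check digit
--         if (len(npi) - 1 - i) % 2 == 1:
--             d *= 2
--             if d > 9: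
--                 d -= 9
--         total += d
--     return total % 10 == 0
--
--
-- def _generate_valid_group_npi_for_dataset(index: int) -> str:
--     """Generate a valid group NPI for large dataset based on index."""
--     base_patterns = [
--         "098765432", "098765433", "098765434", "098765435", "098765436",
--         "098765437", "098765438", "098765439", "098765440", "098765441"
--     ]
--     base = base_patterns[index % len(base_patterns)]
--     # generate-and-test: try each candidate check digit and keep the one that
--     # makes the whole NPI pass Luhn validation (exactly one always does)
--     return next(base + str(c) for c in range(10) if _npi_luhn_valid(base + str(c)))
-- ===== Notes on version B (the rewrite author's own statement) =====
-- stated objective: alternative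
-- what changed: Instead of computing the check digit by a formula over a mutated digit list, B generates the ten candidate NPIs base+c for c in 0..9 and returns the first one that passes a standalone Luhn validator (which doubles digits by position-from-the-right over the full 10-digit string); the unique valid candidate coincides with A's formula result.
import Mathlib
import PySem

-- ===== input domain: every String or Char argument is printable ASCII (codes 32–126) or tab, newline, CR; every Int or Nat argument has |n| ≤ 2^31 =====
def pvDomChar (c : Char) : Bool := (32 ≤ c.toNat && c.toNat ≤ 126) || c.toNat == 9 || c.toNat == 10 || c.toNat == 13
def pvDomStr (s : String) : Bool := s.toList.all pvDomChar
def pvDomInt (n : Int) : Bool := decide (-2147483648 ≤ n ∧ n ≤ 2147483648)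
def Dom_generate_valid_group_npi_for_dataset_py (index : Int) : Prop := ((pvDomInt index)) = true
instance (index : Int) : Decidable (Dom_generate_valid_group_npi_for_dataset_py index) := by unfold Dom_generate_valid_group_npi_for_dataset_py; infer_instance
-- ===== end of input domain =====

-- B replaces A's direct check-digit formula (reverse in-place doubling loop) with
-- generate-and-test: try each check digit 0..9 against a standalone Luhn validator
-- and return the first valid candidate (objective: alternative).

-- ===== PORT A =====
def npiBasePatterns : List String :=
  ["098765432", "098765433", "098765434", "098765435", "098765436",
   "098765437", "098765438", "098765439", "098765440", "098765441"]

def generate_valid_group_npi_for_dataset_py (index : Int) : String :=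
  -- base = base_patterns[index % len(base_patterns)]  (len = 10; index % 10 always in range)
  let base := (PySem.List.pyGet? npiBasePatterns (PySem.Int.mod index 10)).getD ""
  -- payload = [int(d) for d in base]
  let payload := base.toList.map (fun d => (PySem.Int.ofStr? (String.ofList [d])).getD 0)
  -- for i in range(len(payload) - 1, -1, -2): payload[i] *= 2; if payload[i] > 9: payload[i] -= 9
  let payload := (PySem.List.pyRange ((payload.length : Int) - 1) (-1) (-2)).foldl
    (fun p i =>
      let v := (PySem.List.pyGet? p i).getD 0 * 2
      let v := if v > 9 then v - 9 else v
      p.set i.toNat v) payload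
  let total := payload.sum + 24
  let check_digit := PySem.Int.mod (10 - PySem.Int.mod total 10) 10
  base ++ PySem.Int.toStr check_digit

-- ===== PORT B =====
-- _npi_luhn_valid: Luhn check over the full candidate, doubling by position-from-the-right
def npiLuhnValid (npi : String) : Bool :=
  let total := (PySem.List.enumerate npi.toList).foldl
    (fun t p =>
      let d := (PySem.Int.ofStr? (String.ofList [p.2])).getD 0
      let d := if PySem.Int.mod ((npi.toList.length : Int) - 1 - p.1) 2 == 1 then
                 (let d2 := d * 2; if d2 > 9 then d2 - 9 else d2) else d
      t + d) 24
  PySem.Int.mod total 10 == 0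

def generate_valid_group_npi_for_dataset_py_alt (index : Int) : String :=
  let base := (PySem.List.pyGet? npiBasePatterns (PySem.Int.mod index 10)).getD ""
  -- next(base + str(c) for c in range(10) if _npi_luhn_valid(base + str(c)))
  (((PySem.List.pyRange 0 10 1).find?
      (fun c => npiLuhnValid (base ++ PySem.Int.toStr c))).map
    (fun c => base ++ PySem.Int.toStr c)).getD ""

-- ===== PRECONDITION & SPEC =====
def Spec_generate_valid_group_npi_for_dataset_py (index : Int) (out : String) : Prop := out = generate_valid_group_npi_for_dataset_py_alt index
instance (index : Int) (out : String) : Decidable (Spec_generate_valid_group_npi_for_dataset_py index out) := by unfold Spec_generate_valid_group_npi_for_dataset_py; infer_instance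

-- ===== CLAIM =====
def Claim_equal_generate_valid_group_npi_for_dataset_py : Prop := ∀ (index : Int), Dom_generate_valid_group_npi_for_dataset_py index → Spec_generate_valid_group_npi_for_dataset_py index (generate_valid_group_npi_for_dataset_py index)

-- ===== LEMMAS AND PROOFS =====

-- ===== VERDICT =====
theorem generate_valid_group_npi_for_dataset_py_spec : Claim_equal_generate_valid_group_npi_for_dataset_py := by
  intro index _
  unfold Spec_generate_valid_group_npi_for_dataset_py
  unfold generate_valid_group_npi_for_dataset_py generate_valid_group_npi_for_dataset_py_alt
  have h1 : (0:Int) ≤ PySem.Int.mod index 10 := PySem.Int.mod_nonneg index (by norm_num)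
  have h2 : PySem.Int.mod index 10 < 10 := PySem.Int.mod_lt index (by norm_num)
  generalize PySem.Int.mod index 10 = m at h1 h2 ⊢
  interval_cases m <;> decide
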